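-- pv_equiv track=rewrite | github.com/eun0571/synchronizer | 백준/Gold/2573. 빙산/빙산.py | simulate_iceberg
-- ===== SOURCE A (Python) =====
-- from collections import deque
--
-- dx = [-1, 1, 0, 0]
--
-- dy = [0, 0, -1, 1]
--
-- def bfs(x, y, visited, iceberg):
--     queue = deque()
--     queue.append((x, y))
--     visited[x][y] = True
--
--     while queue:
--         cx, cy = queue.popleft()
--
--         for i in range(4):
--             nx = cx + dx[i]
--             ny = cy + dy[i]
--
--             if 0 <= nx < len(iceberg) and 0 <= ny < len(iceberg[0]):
--                 if iceberg[nx][ny] > 0 and not visited[nx][ny]: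
--                     visited[nx][ny] = True
--                     queue.append((nx, ny))
--
-- def melt_iceberg(iceberg):
--     n = len(iceberg)
--     m = len(iceberg[0])
--     new_iceberg = [[0] * m for _ in range(n)]
--
--     for i in range(n):
--         for j in range(m):
--             if iceberg[i][j] > 0:
--                 water_count = 0
--                 for k in range(4):
--                     ni = i + dx[k]
--                     nj = j + dy[k]
--                     if 0 <= ni < n and 0 <= nj < m and iceberg[ni][nj] == 0:
--                         water_count += 1
--                 new_iceberg[i][j] = max(0, iceberg[i][j] - water_count)
--
--     return new_iceberg
--
-- def count_iceberg_parts(iceberg):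
--     n = len(iceberg)
--     m = len(iceberg[0])
--     visited = [[False] * m for _ in range(n)]
--     part_count = 0
--
--     for i in range(n):
--         for j in range(m):
--             if iceberg[i][j] > 0 and not visited[i][j]:
--                 bfs(i, j, visited, iceberg)
--                 part_count += 1
--
--     return part_count
--
-- def simulate_iceberg(iceberg):
--     year = 0
--
--     while True:
--         parts = count_iceberg_parts(iceberg)
--         if parts >= 2:
--             return year
--         if parts == 0:
--             return 0
--
--         iceberg = melt_iceberg(iceberg)
--         year += 1
-- ===== SOURCE B (Python) =====
-- def melt_iceberg(iceberg):
--     n = len(iceberg)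
--     m = len(iceberg[0])
--     new_iceberg = [[0] * m for _ in range(n)]
--     for i in range(n):
--         for j in range(m):
--             if iceberg[i][j] > 0:
--                 water_count = 0
--                 for di, dj in ((-1, 0), (1, 0), (0, -1), (0, 1)):
--                     ni = i + di
--                     nj = j + dj
--                     if 0 <= ni < n and 0 <= nj < m and iceberg[ni][nj] == 0:
--                         water_count += 1
--                 new_iceberg[i][j] = max(0, iceberg[i][j] - water_count)
--     return new_iceberg
--
--
-- def count_iceberg_parts(iceberg):
--     # union-find over flattened cells: union each positive cell with its
--     # positive right/down neighbour, then count roots among positive cells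
--     n = len(iceberg)
--     m = len(iceberg[0])
--     parent = list(range(n * m))
--
--     def find(x):
--         while parent[x] != x:
--             x = parent[x]
--         return x
--
--     def union(a, b):
--         ra, rb = find(a), find(b)
--         if ra < rb:
--             parent[rb] = ra
--         elif rb < ra:
--             parent[ra] = rb
--
--     for i in range(n):
--         for j in range(m):
--             if iceberg[i][j] > 0:
--                 if i + 1 < n and iceberg[i + 1][j] > 0:
--                     union(i * m + j, (i + 1) * m + j)
--                 if j + 1 < m and iceberg[i][j + 1] > 0:
--                     union(i * m + j, i * m + j + 1)
--
--     count = 0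
--     for i in range(n):
--         for j in range(m):
--             if iceberg[i][j] > 0 and find(i * m + j) == i * m + j:
--                 count += 1
--     return count
--
--
-- def simulate_iceberg(iceberg):
--     year = 0
--     while True:
--         parts = count_iceberg_parts(iceberg)
--         if parts >= 2:
--             return year
--         if parts == 0:
--             return 0
--         iceberg = melt_iceberg(iceberg)
--         year += 1
-- ===== Notes on version B (the rewrite author's own statement) =====
-- stated objective: alternative
-- what changed: The BFS flood-fill component count (queue + visited matrix) is replaced by a union-find over flattened cell indices: one scan unions each positive cell with its positive right/down neighbours and the parts count is the number of positive cells that are their own root; melt and the year loop are unchanged.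
import Mathlib
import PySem

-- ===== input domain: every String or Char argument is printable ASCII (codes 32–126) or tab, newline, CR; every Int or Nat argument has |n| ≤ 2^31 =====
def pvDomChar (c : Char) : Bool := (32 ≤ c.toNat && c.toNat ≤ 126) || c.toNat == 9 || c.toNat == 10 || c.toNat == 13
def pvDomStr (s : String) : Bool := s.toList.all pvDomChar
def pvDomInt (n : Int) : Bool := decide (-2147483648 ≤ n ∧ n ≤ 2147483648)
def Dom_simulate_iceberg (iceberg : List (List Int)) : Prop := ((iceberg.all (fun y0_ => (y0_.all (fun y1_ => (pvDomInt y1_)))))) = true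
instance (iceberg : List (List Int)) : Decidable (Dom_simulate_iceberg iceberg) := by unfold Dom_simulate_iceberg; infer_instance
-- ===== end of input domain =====

-- B replaces A's BFS flood-fill part count by a union-find over flattened cells
-- (union each positive cell with its positive right/down neighbour, count roots);
-- objective: alternative algorithm for the component count, same melt/simulate loop.

-- ===== PORT A =====

-- iceberg[i][j] (all accesses in both programs are bounds-guarded, so getD is exact)
def pvGcell (g : List (List Int)) (i j : Nat) : Int := (g.getD i []).getD j 0
-- visited[i][j] / visited[i][j] = True
def pvVget (v : List (List Bool)) (i j : Nat) : Bool := (v.getD i []).getD j false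
def pvVset (v : List (List Bool)) (i j : Nat) : List (List Bool) := v.set i ((v.getD i []).set j true)
-- new_iceberg[i][j] = x
def pvGset (g : List (List Int)) (i j : Nat) (x : Int) : List (List Int) := g.set i ((g.getD i []).set j x)
-- 'for k in range(4): dx[k], dy[k]' ported as iteration over zip(dx, dy)
def pvDirs : List (Int × Int) := [(-1, 0), (1, 0), (0, -1), (0, 1)]

-- the 'while queue' loop of bfs; fuel 2*n*m+1 dominates the loop count (each pop
-- was an append, and every append marks a fresh cell); queue entries are the
-- bounds-checked ints pushed by the loop, stored as Nats after the 0 ≤ _ guard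
def pvBfsLoop (g : List (List Int)) : Nat → List (Nat × Nat) → List (List Bool) → List (List Bool)
  | 0, _, vis => vis
  | _ + 1, [], vis => vis
  | f + 1, c :: qs, vis =>
      let st := pvDirs.foldl (fun (st : List (Nat × Nat) × List (List Bool)) d =>
          let nx : Int := (c.1 : Int) + d.1
          let ny : Int := (c.2 : Int) + d.2
          if 0 ≤ nx ∧ nx < (g.length : Int) ∧ 0 ≤ ny ∧ ny < ((g.headD []).length : Int) then
            if 0 < pvGcell g nx.toNat ny.toNat ∧ pvVget st.2 nx.toNat ny.toNat = false then
              (st.1 ++ [(nx.toNat, ny.toNat)], pvVset st.2 nx.toNat ny.toNat)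
            else st
          else st) (qs, vis)
      pvBfsLoop g f st.1 st.2

def pvBfs (g : List (List Int)) (x y : Nat) (vis : List (List Bool)) : List (List Bool) :=
  pvBfsLoop g (2 * (g.length * (g.headD []).length) + 1) [(x, y)] (pvVset vis x y)

def pvCountA (g : List (List Int)) : Int :=
  ((List.range g.length).foldl (fun st i =>
    (List.range (g.headD []).length).foldl (fun (st : List (List Bool) × Int) j =>
      if 0 < pvGcell g i j ∧ pvVget st.1 i j = false then (pvBfs g i j st.1, st.2 + 1) else st) st)
    (List.replicate g.length (List.replicate (g.headD []).length false), 0)).2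

def pvMelt (g : List (List Int)) : List (List Int) :=
  (List.range g.length).foldl (fun ng i =>
    (List.range (g.headD []).length).foldl (fun ng j =>
      if 0 < pvGcell g i j then
        let wc := pvDirs.foldl (fun (wc : Int) d =>
            let ni : Int := (i : Int) + d.1
            let nj : Int := (j : Int) + d.2
            if 0 ≤ ni ∧ ni < (g.length : Int) ∧ 0 ≤ nj ∧ nj < ((g.headD []).length : Int) ∧
                pvGcell g ni.toNat nj.toNat = 0 then wc + 1 else wc) 0
        pvGset ng i j (max 0 (pvGcell g i j - wc))
      else ng) ng)
    (List.replicate g.length (List.replicate (g.headD []).length 0))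

-- the 'while True' loop: on inputs admitted by Pre_ the run takes at most
-- (sum of positive entries) + 2 iterations, which this fuel provides
def pvFuel (g : List (List Int)) : Nat :=
  (g.foldl (fun s row => row.foldl (fun s v => s + (max v 0).toNat) s) 0) + 2

def pvSimLoopA : Nat → Int → List (List Int) → Int
  | 0, _, _ => 0
  | f + 1, year, g =>
      let parts := pvCountA g
      if 2 ≤ parts then year
      else if parts = 0 then 0
      else pvSimLoopA f (year + 1) (pvMelt g)

def simulate_iceberg (iceberg : List (List Int)) : Int :=
  pvSimLoopA (pvFuel iceberg) 0 iceberg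

-- ===== PORT B =====

-- 'while parent[x] != x: x = parent[x]'; parents strictly decrease, so fuel x+1 suffices
def pvFind (parent : List Nat) : Nat → Nat → Nat
  | 0, x => x
  | f + 1, x => if parent.getD x x = x then x else pvFind parent f (parent.getD x x)

def pvRoot (parent : List Nat) (x : Nat) : Nat := pvFind parent (x + 1) x

def pvUnion (parent : List Nat) (a b : Nat) : List Nat :=
  let ra := pvRoot parent a
  let rb := pvRoot parent b
  if ra < rb then parent.set rb ra
  else if rb < ra then parent.set ra rb
  else parent

def pvCountB (g : List (List Int)) : Int :=
  let n := g.length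
  let m := (g.headD []).length
  let par := (List.range n).foldl (fun par i =>
    (List.range m).foldl (fun (par : List Nat) j =>
      if 0 < pvGcell g i j then
        let par' := if i + 1 < n ∧ 0 < pvGcell g (i + 1) j then pvUnion par (i * m + j) ((i + 1) * m + j) else par
        if j + 1 < m ∧ 0 < pvGcell g i (j + 1) then pvUnion par' (i * m + j) (i * m + j + 1) else par'
      else par) par) (List.range (n * m))
  (List.range n).foldl (fun c i =>
    (List.range m).foldl (fun (c : Int) j =>
      if 0 < pvGcell g i j ∧ pvRoot par (i * m + j) = i * m + j then c + 1 else c) c) 0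

-- Source B's melt_iceberg is verbatim A's melt, and its simulate loop is A's loop
-- with the union-find count, so their ports share pvMelt / pvFuel
def pvSimLoopB : Nat → Int → List (List Int) → Int
  | 0, _, _ => 0
  | f + 1, year, g =>
      let parts := pvCountB g
      if 2 ≤ parts then year
      else if parts = 0 then 0
      else pvSimLoopB f (year + 1) (pvMelt g)

def simulate_iceberg_alt (iceberg : List (List Int)) : Int :=
  pvSimLoopB (pvFuel iceberg) 0 iceberg

-- ===== PRECONDITION & SPEC =====
-- Pre_ excludes (a) the empty grid and grids whose later rows are shorter than
-- row 0, on which Python A raises IndexError, and (b) grids all of whose cells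
-- (in the first len(iceberg[0]) columns) are positive, on which A loops forever
-- (one never-melting component, parts stays 1).
def Pre_simulate_iceberg (iceberg : List (List Int)) : Prop :=
  iceberg ≠ [] ∧
  (∀ row ∈ iceberg, (iceberg.headD []).length ≤ row.length) ∧
  ¬ (0 < (iceberg.headD []).length ∧
     ∀ row ∈ iceberg, ∀ j < (iceberg.headD []).length, 0 < row.getD j 0)
instance (iceberg : List (List Int)) : Decidable (Pre_simulate_iceberg iceberg) := by
  unfold Pre_simulate_iceberg; infer_instance

def pvWitness_simulate_iceberg : List (List Int) := [[0]]

def Spec_simulate_iceberg (iceberg : List (List Int)) (out : Int) : Prop := out = simulate_iceberg_alt iceberg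
instance (iceberg : List (List Int)) (out : Int) : Decidable (Spec_simulate_iceberg iceberg out) := by unfold Spec_simulate_iceberg; infer_instance

-- ===== CLAIM (what is proved, stated in full; the proofs are below) =====
def Claim_equal_simulate_iceberg : Prop := ∀ (iceberg : List (List Int)), Dom_simulate_iceberg iceberg → Pre_simulate_iceberg iceberg → Spec_simulate_iceberg iceberg (simulate_iceberg iceberg)

-- ===== LEMMAS AND PROOFS =====


-- ---------- shared proof-side notions: the positive-cell grid graph ----------

def pvM (g : List (List Int)) : Nat := (g.headD []).length

def PosP (g : List (List Int)) (c : Nat × Nat) : Prop :=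
  c.1 < g.length ∧ c.2 < pvM g ∧ 0 < pvGcell g c.1 c.2

def AdjP (g : List (List Int)) (a b : Nat × Nat) : Prop :=
  PosP g a ∧ PosP g b ∧
    ((a.1 = b.1 ∧ (a.2 + 1 = b.2 ∨ b.2 + 1 = a.2)) ∨
     (a.2 = b.2 ∧ (a.1 + 1 = b.1 ∨ b.1 + 1 = a.1)))

def ConnP (g : List (List Int)) (a b : Nat × Nat) : Prop := Relation.ReflTransGen (AdjP g) a b

def unflat (m p : Nat) : Nat × Nat := (p / m, p % m)

-- scan-order representative: no earlier positive cell is connected to it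
def repAt (g : List (List Int)) (q : Nat) : Prop :=
  PosP g (unflat (pvM g) q) ∧
  ∀ q' < q, PosP g (unflat (pvM g) q') → ¬ ConnP g (unflat (pvM g) q') (unflat (pvM g) q)

noncomputable def repB (g : List (List Int)) : Nat → Bool :=
  fun q => @decide (repAt g q) (Classical.propDecidable _)

noncomputable def repCount (g : List (List Int)) : Nat :=
  (List.range (g.length * pvM g)).countP (repB g)

theorem adjP_symm {g : List (List Int)} {a b : Nat × Nat} (h : AdjP g a b) : AdjP g b a := by
  obtain ⟨ha, hb, h⟩ := h
  exact ⟨hb, ha, by tauto⟩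

theorem connP_symm {g : List (List Int)} {a b : Nat × Nat} (h : ConnP g a b) : ConnP g b a := by
  induction h with
  | refl => exact Relation.ReflTransGen.refl
  | tail _ hadj ih =>
      exact Relation.ReflTransGen.trans (Relation.ReflTransGen.single (adjP_symm hadj)) ih

theorem connP_pos_of_ne {g : List (List Int)} {a b : Nat × Nat} (h : ConnP g a b) (hne : a ≠ b) :
    PosP g a ∧ PosP g b := by
  induction h with
  | refl => exact absurd rfl hne
  | tail hs hadj ih =>
      refine ⟨?_, hadj.2.1⟩
      rcases Relation.ReflTransGen.cases_head hs with h | ⟨c, hc, _⟩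
      · exact h ▸ hadj.1
      · exact hc.1

theorem flat_unflat {m : Nat} (p : Nat) (_hm : 0 < m) : (unflat m p).1 * m + (unflat m p).2 = p := by
  simp only [unflat]
  rw [Nat.mul_comm]
  exact Nat.div_add_mod p m

theorem unflat_flat {m : Nat} (c : Nat × Nat) (hc : c.2 < m) : unflat m (c.1 * m + c.2) = c := by
  have hm : 0 < m := Nat.lt_of_le_of_lt (Nat.zero_le _) hc
  unfold unflat
  have h1 : (c.1 * m + c.2) / m = c.1 := by
    rw [Nat.mul_comm, Nat.mul_add_div hm, Nat.div_eq_of_lt hc]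
    omega
  have h2 : (c.1 * m + c.2) % m = c.2 := by
    rw [Nat.mul_comm, Nat.mul_add_mod, Nat.mod_eq_of_lt hc]
  rw [h1, h2]

theorem unflat_lt {m n p : Nat} (hp : p < n * m) : (unflat m p).1 < n ∧ (unflat m p).2 < m := by
  have hm : 0 < m := by by_contra h; simp [Nat.le_zero.mp (Nat.not_lt.mp h)] at hp
  constructor
  · exact Nat.div_lt_of_lt_mul (by rwa [Nat.mul_comm] at hp)
  · exact Nat.mod_lt _ hm

theorem flat_lt {m n : Nat} (c : Nat × Nat) (h1 : c.1 < n) (h2 : c.2 < m) : c.1 * m + c.2 < n * m := by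
  calc c.1 * m + c.2 < (c.1 + 1) * m := by nlinarith
    _ ≤ n * m := Nat.mul_le_mul_right _ h1

-- ---------- fold reshaping: nested row/column loops as one flat scan ----------

theorem foldl_range_mul {σ : Type} (n m : Nat) (f : σ → Nat → Nat → σ) (init : σ) :
    (List.range n).foldl (fun st i => (List.range m).foldl (fun st j => f st i j) st) init
      = (List.range (n * m)).foldl (fun st p => f st (p / m) (p % m)) init := by
  induction n generalizing init with
  | zero => simp
  | succ n ih =>
      rw [List.range_succ, List.foldl_append, ih, Nat.succ_mul, List.range_add,
        List.foldl_append, List.foldl_map]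
      simp only [List.foldl_cons, List.foldl_nil]
      by_cases hm : 0 < m
      · refine PySem.List.foldl_congr_mem _ _ _ _ ?_
        intro st j hj
        have hjm : j < m := List.mem_range.mp hj
        have e1 : (n * m + j) / m = n := by
          rw [Nat.mul_comm, Nat.mul_add_div hm, Nat.div_eq_of_lt hjm]
          omega
        have e2 : (n * m + j) % m = j := by
          rw [Nat.mul_comm, Nat.mul_add_mod, Nat.mod_eq_of_lt hjm]
        rw [e1, e2]
      · have : m = 0 := by omega
        subst this; rfl

-- ---------- visited-matrix utilities ----------

def Shape (n m : Nat) (v : List (List Bool)) : Prop :=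
  v.length = n ∧ ∀ r ∈ v, r.length = m

def visCard (v : List (List Bool)) : Nat := (v.map (fun r => r.countP id)).sum

theorem visCard_le {n m : Nat} {v : List (List Bool)} (h : Shape n m v) : visCard v ≤ n * m := by
  obtain ⟨hl, hr⟩ := h
  subst hl
  induction v with
  | nil => simp [visCard]
  | cons r t ih =>
      simp only [visCard, List.map_cons, List.sum_cons, List.length_cons]
      have h1 : r.countP id ≤ m := (hr r (by simp)) ▸ List.countP_le_length
      have h2 := ih (fun r hrr => hr r (by simp [hrr]))
      simp only [visCard] at h2
      calc _ ≤ m + t.length * m := by omega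
        _ ≤ (t.length + 1) * m := by nlinarith

theorem shape_vset {n m : Nat} {v : List (List Bool)} (h : Shape n m v) {i j : Nat}
    (hi : i < n) : Shape n m (pvVset v i j) := by
  obtain ⟨hl, hr⟩ := h
  refine ⟨by simp [pvVset, hl], ?_⟩
  intro r hrr
  rcases List.mem_or_eq_of_mem_set hrr with hmem | heq
  · exact hr _ hmem
  · subst heq
    rw [List.length_set, List.getD_eq_getElem _ _ (by omega)]
    exact hr _ (List.getElem_mem _)

theorem vget_vset_self {v : List (List Bool)} {i j : Nat}
    (hiv : i < v.length) (hj : j < (v.getD i []).length) :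
    pvVget (pvVset v i j) i j = true := by
  unfold pvVget pvVset
  have h1 : (v.set i ((v.getD i []).set j true)).getD i [] = (v.getD i []).set j true := by
    simp [List.getD, hiv]
  rw [h1]
  simp only [List.getD] at hj ⊢
  simp [hj]

theorem vget_vset_ne {v : List (List Bool)} {i j a b : Nat} (hne : ¬ (a = i ∧ b = j)) :
    pvVget (pvVset v i j) a b = pvVget v a b := by
  unfold pvVget pvVset
  by_cases hai : a = i
  · subst hai
    have hbj : b ≠ j := fun h => hne ⟨rfl, h⟩
    by_cases hi : a < v.length
    · have h1 : (v.set a ((v.getD a []).set j true)).getD a [] = (v.getD a []).set j true := by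
        simp [List.getD, hi]
      rw [h1]
      simp only [List.getD]
      simp [Ne.symm hbj]
    · rw [List.set_eq_of_length_le (by omega)]
  · have h1 : (v.set i ((v.getD i []).set j true)).getD a [] = v.getD a [] := by
      simp [List.getD, Ne.symm hai]
    rw [h1]

theorem countP_set_true (l : List Bool) (j : Nat) (h : j < l.length) (hf : l.getD j false = false) :
    (l.set j true).countP id = l.countP id + 1 := by
  induction l generalizing j with
  | nil => simp at h
  | cons a t ih =>
      cases j with
      | zero => simp_all
      | succ j =>
          simp only [List.length_cons, Nat.succ_lt_succ_iff] at h
          simp only [List.getD, List.getElem?_cons_succ] at hf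
          simp only [List.set, List.countP_cons, ih j h hf]
          omega

theorem visCard_vset : ∀ (v : List (List Bool)) (i j : Nat), i < v.length →
    j < (v.getD i []).length → pvVget v i j = false →
    visCard (pvVset v i j) = visCard v + 1 := by
  intro v
  induction v with
  | nil => intro i j hi; simp at hi
  | cons r t ih =>
      intro i j hi hj hf
      cases i with
      | zero =>
          simp only [List.getD_cons_zero] at hj
          simp only [pvVset, List.getD_cons_zero, List.set_cons_zero]
          simp only [visCard, List.map_cons, List.sum_cons]
          rw [countP_set_true r j hj (by simpa [pvVget] using hf)]
          omega
      | succ i =>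
          have hstep : pvVset (r :: t) (i + 1) j = r :: pvVset t i j := by
            simp [pvVset, List.set]
          rw [hstep]
          simp only [visCard, List.map_cons, List.sum_cons]
          have := ih i j (by simpa using hi) (by simpa using hj) (by simpa [pvVget] using hf)
          simp only [visCard] at this
          omega


-- ---------- BFS correctness: the flood fill marks exactly the component ----------

-- the body of bfs's inner 'for' loop, named for the proofs (identical text to the port's lambda)
def bfsBody (g : List (List Int)) (c : Nat × Nat) (st : List (Nat × Nat) × List (List Bool))
    (d : Int × Int) : List (Nat × Nat) × List (List Bool) :=
  let nx : Int := (c.1 : Int) + d.1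
  let ny : Int := (c.2 : Int) + d.2
  if 0 ≤ nx ∧ nx < (g.length : Int) ∧ 0 ≤ ny ∧ ny < ((g.headD []).length : Int) then
    if 0 < pvGcell g nx.toNat ny.toNat ∧ pvVget st.2 nx.toNat ny.toNat = false then
      (st.1 ++ [(nx.toNat, ny.toNat)], pvVset st.2 nx.toNat ny.toNat)
    else st
  else st

theorem pvBfsLoop_succ (g : List (List Int)) (f : Nat) (c : Nat × Nat) (qs : List (Nat × Nat))
    (vis : List (List Bool)) :
    pvBfsLoop g (f + 1) (c :: qs) vis =
      pvBfsLoop g f (pvDirs.foldl (bfsBody g c) (qs, vis)).1 (pvDirs.foldl (bfsBody g c) (qs, vis)).2 := rfl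

def candC (g : List (List Int)) (c : Nat × Nat) (d : Int × Int) : Option (Nat × Nat) :=
  if 0 ≤ (c.1 : Int) + d.1 ∧ (c.1 : Int) + d.1 < (g.length : Int) ∧
      0 ≤ (c.2 : Int) + d.2 ∧ (c.2 : Int) + d.2 < ((g.headD []).length : Int) then
    some (((c.1 : Int) + d.1).toNat, ((c.2 : Int) + d.2).toNat)
  else none

theorem bfsBody_cases (g : List (List Int)) (c : Nat × Nat)
    (st : List (Nat × Nat) × List (List Bool)) (d : Int × Int) :
    bfsBody g c st d =
      match candC g c d with
      | none => st
      | some e =>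
          if 0 < pvGcell g e.1 e.2 ∧ pvVget st.2 e.1 e.2 = false then
            (st.1 ++ [e], pvVset st.2 e.1 e.2)
          else st := by
  simp only [bfsBody, candC]
  split_ifs with h h2
  · exact (if_pos h2).symm
  · exact (if_neg h2).symm
  · rfl

theorem candC_some_adj {g : List (List Int)} {c e : Nat × Nat} {d : Int × Int}
    (hc : PosP g c) (hd : d ∈ pvDirs) (he : candC g c d = some e)
    (hpe : 0 < pvGcell g e.1 e.2) : AdjP g c e := by
  rcases (by simpa [pvDirs] using hd : d = (-1, 0) ∨ d = (1, 0) ∨ d = (0, -1) ∨ d = (0, 1)) with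
    rfl | rfl | rfl | rfl
  · unfold candC at he
    norm_num at he
    obtain ⟨⟨h1, h2, h3⟩, rfl⟩ := he
    refine ⟨hc, ⟨?_, ?_, hpe⟩, ?_⟩
    · dsimp only; omega
    · dsimp only; unfold pvM; simp only [List.headD_eq_head?_getD]; omega
    · right; dsimp only; omega
  · unfold candC at he
    norm_num at he
    obtain ⟨⟨h1, h2, h3⟩, rfl⟩ := he
    refine ⟨hc, ⟨?_, ?_, hpe⟩, ?_⟩
    · dsimp only; omega
    · dsimp only; unfold pvM; simp only [List.headD_eq_head?_getD]; omega
    · right; dsimp only; omega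
  · unfold candC at he
    norm_num at he
    obtain ⟨⟨h1, h2, h3⟩, rfl⟩ := he
    refine ⟨hc, ⟨?_, ?_, hpe⟩, ?_⟩
    · dsimp only; omega
    · dsimp only; unfold pvM; simp only [List.headD_eq_head?_getD]; omega
    · left; dsimp only; omega
  · unfold candC at he
    norm_num at he
    obtain ⟨⟨h1, h2, h3⟩, rfl⟩ := he
    refine ⟨hc, ⟨?_, ?_, hpe⟩, ?_⟩
    · dsimp only; omega
    · dsimp only; unfold pvM; simp only [List.headD_eq_head?_getD]; omega
    · left; dsimp only; omega

theorem adj_candC {g : List (List Int)} {c e : Nat × Nat} (h : AdjP g c e) :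
    ∃ d ∈ pvDirs, candC g c d = some e := by
  obtain ⟨⟨hc1, hc2, _⟩, ⟨he1, he2, _⟩, hgeo⟩ := h
  unfold pvM at hc2 he2
  rcases hgeo with ⟨hh, hv | hv⟩ | ⟨hh, hv | hv⟩
  · refine ⟨(0, 1), by simp [pvDirs], ?_⟩
    unfold candC
    rw [if_pos (by dsimp only; omega)]
    exact congrArg some (Prod.ext (by dsimp only; omega) (by dsimp only; omega))
  · refine ⟨(0, -1), by simp [pvDirs], ?_⟩
    unfold candC
    rw [if_pos (by dsimp only; omega)]
    exact congrArg some (Prod.ext (by dsimp only; omega) (by dsimp only; omega))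
  · refine ⟨(1, 0), by simp [pvDirs], ?_⟩
    unfold candC
    rw [if_pos (by dsimp only; omega)]
    exact congrArg some (Prod.ext (by dsimp only; omega) (by dsimp only; omega))
  · refine ⟨(-1, 0), by simp [pvDirs], ?_⟩
    unfold candC
    rw [if_pos (by dsimp only; omega)]
    exact congrArg some (Prod.ext (by dsimp only; omega) (by dsimp only; omega))

theorem candC_bounds {g : List (List Int)} {c e : Nat × Nat} {d : Int × Int}
    (he : candC g c d = some e) : e.1 < g.length ∧ e.2 < pvM g := by
  unfold candC at he
  split_ifs at he with hg
  obtain ⟨h1, h2, h3, h4⟩ := hg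
  injection he with he
  subst he
  unfold pvM
  exact ⟨by dsimp only; omega, by dsimp only; omega⟩

theorem bfs_inner (g : List (List Int)) (c : Nat × Nat) :
    ∀ (D : List (Int × Int)) (qs : List (Nat × Nat)) (vis : List (List Bool)),
    Shape g.length (pvM g) vis →
    ∃ new : List (Nat × Nat),
      (D.foldl (bfsBody g c) (qs, vis)).1 = qs ++ new ∧
      Shape g.length (pvM g) (D.foldl (bfsBody g c) (qs, vis)).2 ∧
      visCard (D.foldl (bfsBody g c) (qs, vis)).2 = visCard vis + new.length ∧
      (∀ e : Nat × Nat, pvVget (D.foldl (bfsBody g c) (qs, vis)).2 e.1 e.2 = true ↔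
        (pvVget vis e.1 e.2 = true ∨ e ∈ new)) ∧
      (∀ e ∈ new, PosP g e ∧ pvVget vis e.1 e.2 = false ∧ ∃ d ∈ D, candC g c d = some e) ∧
      (∀ d ∈ D, ∀ e : Nat × Nat, candC g c d = some e → 0 < pvGcell g e.1 e.2 →
        pvVget (D.foldl (bfsBody g c) (qs, vis)).2 e.1 e.2 = true) := by
  intro D
  induction D with
  | nil =>
      intro qs vis hsh
      exact ⟨[], by simp, hsh, by simp, by simp, by simp, by simp⟩
  | cons d D ih =>
      intro qs vis hsh
      rw [List.foldl_cons, bfsBody_cases]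
      rcases hcd : candC g c d with _ | e
      · simp only []
        obtain ⟨new, h1, h2, h3, h4, h5, h6⟩ := ih qs vis hsh
        refine ⟨new, h1, h2, h3, h4, ?_, ?_⟩
        · intro e he
          obtain ⟨p1, p2, dd, hdd, hc2⟩ := h5 e he
          exact ⟨p1, p2, dd, by simp [hdd], hc2⟩
        · intro d' hd' e' hce' hpe'
          rcases List.mem_cons.mp hd' with rfl | hd'
          · rw [hcd] at hce'; cases hce'
          · exact h6 d' hd' e' hce' hpe'
      · simp only []
        have hb := candC_bounds hcd
        by_cases hcond : 0 < pvGcell g e.1 e.2 ∧ pvVget vis e.1 e.2 = false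
        · rw [if_pos hcond]
          have hsl := hsh.1
          have hsh' : Shape g.length (pvM g) (pvVset vis e.1 e.2) := shape_vset hsh hb.1
          obtain ⟨new, h1, h2, h3, h4, h5, h6⟩ := ih (qs ++ [e]) (pvVset vis e.1 e.2) hsh'
          have hrowlen : (vis.getD e.1 []).length = pvM g := by
            rw [List.getD_eq_getElem _ _ (by omega : e.1 < vis.length)]
            exact hsh.2 _ (List.getElem_mem _)
          have hself : pvVget (pvVset vis e.1 e.2) e.1 e.2 = true :=
            vget_vset_self (by omega) (by omega)
          have hvv : ∀ e' : Nat × Nat, pvVget (pvVset vis e.1 e.2) e'.1 e'.2 = true ↔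
              (pvVget vis e'.1 e'.2 = true ∨ e' = e) := by
            intro e'
            by_cases he' : e' = e
            · subst he'; simp [hself]
            · rw [vget_vset_ne (by
                intro hcc
                exact he' (Prod.ext hcc.1 hcc.2))]
              simp [he']
          refine ⟨e :: new, by simpa using h1, h2, ?_, ?_, ?_, ?_⟩
          · have hvc := visCard_vset vis e.1 e.2 (by omega) (by omega) hcond.2
            rw [h3, hvc]
            simp only [List.length_cons]
            omega
          · intro e'
            rw [h4 e', hvv e']
            simp only [List.mem_cons]
            tauto
          · intro e' he'
            rcases List.mem_cons.mp he' with rfl | he'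
            · exact ⟨⟨hb.1, hb.2, hcond.1⟩, hcond.2, d, by simp, hcd⟩
            · obtain ⟨p1, p2, dd, hdd, hc2⟩ := h5 e' he'
              refine ⟨p1, ?_, dd, by simp [hdd], hc2⟩
              rcases Bool.eq_false_or_eq_true (pvVget vis e'.1 e'.2) with ht | hf
              · rw [(hvv e').mpr (Or.inl ht)] at p2
                cases p2
              · exact hf
          · intro d' hd' e' hce' hpe'
            rcases List.mem_cons.mp hd' with rfl | hd'
            · have : e' = e := by
                rw [hcd] at hce'
                injection hce' with h
                exact h.symm
              subst this
              rw [h4 e']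
              left
              exact hself
            · exact h6 d' hd' e' hce' hpe'
        · rw [if_neg hcond]
          obtain ⟨new, h1, h2, h3, h4, h5, h6⟩ := ih qs vis hsh
          refine ⟨new, h1, h2, h3, h4, ?_, ?_⟩
          · intro e' he'
            obtain ⟨p1, p2, dd, hdd, hc2⟩ := h5 e' he'
            exact ⟨p1, p2, dd, by simp [hdd], hc2⟩
          · intro d' hd' e' hce' hpe'
            rcases List.mem_cons.mp hd' with rfl | hd'
            · have : e' = e := by
                rw [hcd] at hce'
                injection hce' with h
                exact h.symm
              subst this
              have hvis : pvVget vis e'.1 e'.2 = true := by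
                rcases Bool.eq_false_or_eq_true (pvVget vis e'.1 e'.2) with ht | hf
                · exact ht
                · exact absurd ⟨hpe', hf⟩ hcond
              rw [h4 e']
              exact Or.inl hvis
            · exact h6 d' hd' e' hce' hpe'


def BfsInv (g : List (List Int)) (vis0 : List (List Bool)) (c0 : Nat × Nat)
    (q : List (Nat × Nat)) (vis : List (List Bool)) : Prop :=
  Shape g.length (pvM g) vis ∧
  (∀ e : Nat × Nat, pvVget vis0 e.1 e.2 = true → pvVget vis e.1 e.2 = true) ∧
  pvVget vis c0.1 c0.2 = true ∧
  (∀ e : Nat × Nat, pvVget vis e.1 e.2 = true →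
    pvVget vis0 e.1 e.2 = true ∨ (PosP g e ∧ ConnP g c0 e)) ∧
  (∀ e ∈ q, pvVget vis e.1 e.2 = true ∧ PosP g e ∧ ConnP g c0 e) ∧
  (∀ e : Nat × Nat, pvVget vis e.1 e.2 = true → pvVget vis0 e.1 e.2 = false → e ∉ q →
    ∀ d, AdjP g e d → pvVget vis d.1 d.2 = true)

theorem bfsLoop_spec (g : List (List Int)) (vis0 : List (List Bool)) (c0 : Nat × Nat)
    (hclosed : ∀ a b : Nat × Nat, pvVget vis0 a.1 a.2 = true → AdjP g a b →
      pvVget vis0 b.1 b.2 = true) :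
    ∀ (fuel : Nat) (q : List (Nat × Nat)) (vis : List (List Bool)),
    BfsInv g vis0 c0 q vis →
    q.length + 2 * (g.length * pvM g) < fuel + 2 * visCard vis →
    Shape g.length (pvM g) (pvBfsLoop g fuel q vis) ∧
    (∀ e : Nat × Nat, pvVget (pvBfsLoop g fuel q vis) e.1 e.2 = true ↔
      (pvVget vis0 e.1 e.2 = true ∨ (PosP g e ∧ ConnP g c0 e))) := by
  intro fuel
  induction fuel with
  | zero =>
      intro q vis hInv hmeas
      exfalso
      have := visCard_le hInv.1
      omega
  | succ f ih =>
      intro q vis hInv hmeas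
      obtain ⟨hsh, hmono, hc0, hcls, hq, hfr⟩ := hInv
      cases q with
      | nil =>
          refine ⟨hsh, fun e => ⟨fun h => hcls e h, fun h => ?_⟩⟩
          have key : ∀ e : Nat × Nat, ConnP g c0 e → pvVget vis e.1 e.2 = true := by
            intro e he
            induction he with
            | refl => exact hc0
            | tail hs hadj ihh =>
                rcases Bool.eq_false_or_eq_true (pvVget vis0 _ _) with hb0 | hb0
                · exact hmono _ (hclosed _ _ hb0 hadj)
                · exact hfr _ ihh hb0 (List.not_mem_nil) _ hadj
          rcases h with h | ⟨_, hconn⟩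
          · exact hmono e h
          · exact key e hconn
      | cons c qs =>
          rw [pvBfsLoop_succ]
          obtain ⟨hcvis, hcpos, hcconn⟩ := hq c List.mem_cons_self
          obtain ⟨new, h1, h2, h3, h4, h5, h6⟩ := bfs_inner g c pvDirs qs vis hsh
          have hmono' : ∀ e : Nat × Nat, pvVget vis e.1 e.2 = true →
              pvVget (pvDirs.foldl (bfsBody g c) (qs, vis)).2 e.1 e.2 = true :=
            fun e h => (h4 e).mpr (Or.inl h)
          have hnewconn : ∀ e ∈ new, PosP g e ∧ ConnP g c0 e := by
            intro e he
            obtain ⟨hp, _, d, hd, hcd⟩ := h5 e he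
            exact ⟨hp, hcconn.tail (candC_some_adj hcpos hd hcd hp.2.2)⟩
          rw [h1]
          refine (ih _ _ ⟨h2, fun e h => hmono' e (hmono e h), hmono' _ hc0, ?_, ?_, ?_⟩ ?_).imp
            id id
          · intro e h
            rcases (h4 e).mp h with hold | hnew
            · exact hcls e hold
            · exact Or.inr ⟨(h5 e hnew).1, (hnewconn e hnew).2⟩
          · intro e he
            rcases List.mem_append.mp he with he | he
            · obtain ⟨hv, hp, hcn⟩ := hq e (List.mem_cons_of_mem _ he)
              exact ⟨hmono' e hv, hp, hcn⟩
            · exact ⟨(h4 e).mpr (Or.inr he), (h5 e he).1, (hnewconn e he).2⟩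
          · intro e hev he0 henq d hadj
            by_cases henew : e ∈ new
            · exact absurd (List.mem_append.mpr (Or.inr henew)) henq
            have heold : pvVget vis e.1 e.2 = true := by
              rcases (h4 e).mp hev with h | h
              · exact h
              · exact absurd h henew
            by_cases hec : e = c
            · subst hec
              obtain ⟨dd, hdd, hcdd⟩ := adj_candC hadj
              exact h6 dd hdd d hcdd hadj.2.1.2.2
            · have henq' : e ∉ c :: qs := by
                intro hmem
                rcases List.mem_cons.mp hmem with h | h
                · exact hec h
                · exact henq (List.mem_append.mpr (Or.inl h))
              exact hmono' d (hfr e heold he0 henq' d hadj)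
          · simp only [List.length_append, List.length_cons] at hmeas ⊢
            omega

theorem bfs_spec (g : List (List Int)) (vis : List (List Bool)) (x y : Nat)
    (hsh : Shape g.length (pvM g) vis)
    (hpos : PosP g (x, y)) (hunvis : pvVget vis x y = false)
    (hclosed : ∀ a b : Nat × Nat, pvVget vis a.1 a.2 = true → AdjP g a b →
      pvVget vis b.1 b.2 = true) :
    Shape g.length (pvM g) (pvBfs g x y vis) ∧
    (∀ e : Nat × Nat, pvVget (pvBfs g x y vis) e.1 e.2 = true ↔
      (pvVget vis e.1 e.2 = true ∨ (PosP g e ∧ ConnP g (x, y) e))) := by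
  unfold pvBfs
  have hx : x < g.length := hpos.1
  have hy : y < pvM g := hpos.2.1
  have hsl := hsh.1
  have hrowlen : (vis.getD x []).length = pvM g := by
    rw [List.getD_eq_getElem _ _ (by omega : x < vis.length)]
    exact hsh.2 _ (List.getElem_mem _)
  have hself : pvVget (pvVset vis x y) x y = true := vget_vset_self (by omega) (by omega)
  have hvv : ∀ e : Nat × Nat, pvVget (pvVset vis x y) e.1 e.2 = true ↔
      (pvVget vis e.1 e.2 = true ∨ e = (x, y)) := by
    intro e
    by_cases he : e = (x, y)
    · subst he; simp [hself]
    · rw [vget_vset_ne (by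
        intro hcc
        exact he (Prod.ext hcc.1 hcc.2))]
      simp [he]
  have hInv : BfsInv g vis (x, y) [(x, y)] (pvVset vis x y) := by
    refine ⟨shape_vset hsh hx, fun e h => (hvv e).mpr (Or.inl h), hself, ?_, ?_, ?_⟩
    · intro e h
      rcases (hvv e).mp h with h | rfl
      · exact Or.inl h
      · exact Or.inr ⟨hpos, Relation.ReflTransGen.refl⟩
    · intro e he
      rcases List.mem_cons.mp he with rfl | h
      · exact ⟨hself, hpos, Relation.ReflTransGen.refl⟩
      · cases h
    · intro e hev he0 henq d hadj
      exfalso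
      rcases (hvv e).mp hev with h | rfl
      · rw [h] at he0; cases he0
      · exact henq (by simp)
  have hcard : visCard (pvVset vis x y) = visCard vis + 1 :=
    visCard_vset vis x y (by omega) (by omega) hunvis
  have hres := bfsLoop_spec g vis (x, y) hclosed (2 * (g.length * (g.headD []).length) + 1)
    [(x, y)] (pvVset vis x y) hInv (by
      have hble : visCard (pvVset vis x y) ≤ g.length * pvM g := visCard_le (shape_vset hsh hx)
      unfold pvM at *
      simp only [List.length_cons, List.length_nil]
      omega)
  exact hres


-- ---------- A's outer scan: count = number of scan-order representatives ----------

def cntABody (g : List (List Int)) (st : List (List Bool) × Int) (i j : Nat) :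
    List (List Bool) × Int :=
  if 0 < pvGcell g i j ∧ pvVget st.1 i j = false then (pvBfs g i j st.1, st.2 + 1) else st

def ReachSet (g : List (List Int)) (p : Nat) (e : Nat × Nat) : Prop :=
  ∃ q < p, PosP g (unflat (pvM g) q) ∧ ConnP g (unflat (pvM g) q) e

def AInit (g : List (List Int)) : List (List Bool) × Int :=
  (List.replicate g.length (List.replicate (pvM g) false), (0 : Int))

def AInv (g : List (List Int)) (p : Nat) (st : List (List Bool) × Int) : Prop :=
  Shape g.length (pvM g) st.1 ∧
  (∀ e : Nat × Nat, pvVget st.1 e.1 e.2 = true ↔ ReachSet g p e) ∧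
  st.2 = ((List.range p).countP (repB g) : Int)

theorem countP_range_succ (pb : Nat → Bool) (p : Nat) :
    (List.range (p + 1)).countP pb = (List.range p).countP pb + (if pb p then 1 else 0) := by
  rw [List.range_succ, List.countP_append]
  simp [List.countP_cons]

theorem vget_AInit (g : List (List Int)) (i j : Nat) : pvVget (AInit g).1 i j = false := by
  unfold AInit pvVget
  have h : (List.replicate g.length (List.replicate (pvM g) false)).getD i [] =
      List.replicate (pvM g) false ∨
      (List.replicate g.length (List.replicate (pvM g) false)).getD i [] = [] := by
    by_cases hi : i < g.length
    · left
      rw [List.getD_eq_getElem _ _ (by simpa using hi)]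
      exact List.getElem_replicate _
    · right
      exact List.getD_eq_default _ _ (by simpa using Nat.le_of_not_lt hi)
  rcases h with h | h <;> rw [h]
  · by_cases hj : j < pvM g
    · rw [List.getD_eq_getElem _ _ (by simpa using hj)]
      exact List.getElem_replicate _
    · exact List.getD_eq_default _ _ (by simpa using Nat.le_of_not_lt hj)
  · rfl

theorem A_loop (g : List (List Int)) :
    ∀ p, p ≤ g.length * pvM g →
    AInv g p ((List.range p).foldl (fun st q => cntABody g st (q / pvM g) (q % pvM g)) (AInit g)) := by
  intro p
  induction p with
  | zero =>
      intro _
      refine ⟨⟨by simp [AInit], ?_⟩, ?_, by simp [AInit]⟩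
      · intro r hr
        rw [List.eq_of_mem_replicate hr]
        simp
      · intro e
        simp only [List.range_zero, List.foldl_nil]
        rw [vget_AInit]
        constructor
        · intro h; cases h
        · rintro ⟨q, hq, _⟩; omega
  | succ p ih =>
      intro hp
      have hih := ih (by omega)
      rw [List.range_succ, List.foldl_append, List.foldl_cons, List.foldl_nil]
      set st := (List.range p).foldl (fun st q => cntABody g st (q / pvM g) (q % pvM g)) (AInit g) with hst
      obtain ⟨hsh, hiff, hcnt⟩ := hih
      have hpm : p < g.length * pvM g := by omega
      have hm : 0 < pvM g := by
        by_contra h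
        have : pvM g = 0 := by omega
        rw [this, Nat.mul_zero] at hpm
        omega
      have hcb := unflat_lt (n := g.length) hpm
      have hcu : (p / pvM g, p % pvM g) = unflat (pvM g) p := rfl
      unfold cntABody
      by_cases hpos : 0 < pvGcell g (p / pvM g) (p % pvM g)
      · have hposP : PosP g (unflat (pvM g) p) := ⟨hcb.1, hcb.2, hpos⟩
        by_cases hvis : pvVget st.1 (p / pvM g) (p % pvM g) = false
        · rw [if_pos ⟨hpos, hvis⟩]
          have hclosed : ∀ a b : Nat × Nat, pvVget st.1 a.1 a.2 = true → AdjP g a b →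
              pvVget st.1 b.1 b.2 = true := by
            intro a b ha hadj
            obtain ⟨q, hq, hqpos, hqconn⟩ := (hiff a).mp ha
            exact (hiff b).mpr ⟨q, hq, hqpos, hqconn.tail hadj⟩
          have hbfs := bfs_spec g st.1 (p / pvM g) (p % pvM g) hsh hposP hvis hclosed
          have hnotreach : ¬ ReachSet g p (unflat (pvM g) p) := by
            intro hr
            have hvt := (hiff _).mpr hr
            dsimp only [unflat] at hvt
            rw [hvt] at hvis
            cases hvis
          refine ⟨hbfs.1, ?_, ?_⟩
          · intro e
            rw [hbfs.2 e, hiff e]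
            constructor
            · rintro (⟨q, hq, hqp, hqc⟩ | ⟨hep, hec⟩)
              · exact ⟨q, by omega, hqp, hqc⟩
              · exact ⟨p, by omega, hposP, hec⟩
            · rintro ⟨q, hq, hqp, hqc⟩
              rcases Nat.lt_or_ge q p with hqlt | hqge
              · exact Or.inl ⟨q, hqlt, hqp, hqc⟩
              · have : q = p := by omega
                subst this
                by_cases he : unflat (pvM g) q = e
                · exact Or.inr ⟨he ▸ hqp, he ▸ Relation.ReflTransGen.refl⟩
                · exact Or.inr ⟨(connP_pos_of_ne hqc he).2, hqc⟩
          · have hrep : repAt g p := by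
              refine ⟨hposP, ?_⟩
              intro q' hq' hq'pos hq'conn
              exact hnotreach ⟨q', hq', hq'pos, hq'conn⟩
            have hb : repB g p = true := by
              unfold repB
              exact @decide_eq_true (repAt g p) (Classical.propDecidable _) hrep
            rw [countP_range_succ, hb, if_pos rfl]
            push_cast
            omega
        · rw [if_neg (by
            intro hcc
            exact hvis hcc.2)]
          have hvist : pvVget st.1 (p / pvM g) (p % pvM g) = true := by
            rcases Bool.eq_false_or_eq_true (pvVget st.1 (p / pvM g) (p % pvM g)) with h | h
            · exact h
            · exact absurd h hvis
          have hreach : ReachSet g p (unflat (pvM g) p) := (hiff _).mp hvist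
          refine ⟨hsh, ?_, ?_⟩
          · intro e
            rw [hiff e]
            constructor
            · rintro ⟨q, hq, hqp, hqc⟩
              exact ⟨q, by omega, hqp, hqc⟩
            · rintro ⟨q, hq, hqp, hqc⟩
              rcases Nat.lt_or_ge q p with hqlt | hqge
              · exact ⟨q, hqlt, hqp, hqc⟩
              · have : q = p := by omega
                subst this
                obtain ⟨q', hq', hq'p, hq'c⟩ := hreach
                exact ⟨q', hq', hq'p, hq'c.trans hqc⟩
          · have hrep : ¬ repAt g p := by
              intro hrep
              obtain ⟨q', hq', hq'p, hq'c⟩ := hreach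
              exact hrep.2 q' hq' hq'p hq'c
            have hb : repB g p = false := by
              unfold repB
              exact @decide_eq_false (repAt g p) (Classical.propDecidable _) hrep
            rw [countP_range_succ, hb, if_neg (by simp)]
            push_cast
            omega
      · rw [if_neg (by
          intro hcc
          exact hpos hcc.1)]
        have hnpos : ¬ PosP g (unflat (pvM g) p) := by
          intro hcc
          exact hpos hcc.2.2
        refine ⟨hsh, ?_, ?_⟩
        · intro e
          rw [hiff e]
          constructor
          · rintro ⟨q, hq, hqp, hqc⟩
            exact ⟨q, by omega, hqp, hqc⟩
          · rintro ⟨q, hq, hqp, hqc⟩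
            rcases Nat.lt_or_ge q p with hqlt | hqge
            · exact ⟨q, hqlt, hqp, hqc⟩
            · have : q = p := by omega
              subst this
              exact absurd hqp hnpos
        · have hb : repB g p = false := by
            unfold repB
            exact @decide_eq_false (repAt g p) (Classical.propDecidable _) (fun hrep => hnpos hrep.1)
          rw [countP_range_succ, hb, if_neg (by simp)]
          push_cast
          omega

theorem countA_spec (g : List (List Int)) : pvCountA g = (repCount g : Int) := by
  have hre : pvCountA g =
      ((List.range (g.length * pvM g)).foldl
        (fun st q => cntABody g st (q / pvM g) (q % pvM g)) (AInit g)).2 := by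
    unfold pvCountA
    exact congrArg Prod.snd (foldl_range_mul g.length (pvM g) (cntABody g) (AInit g))
  rw [hre, (A_loop g (g.length * pvM g) (le_refl _)).2.2]
  rfl


-- ---------- union-find: roots under a parent array with decreasing parents ----------

def Wf (N : Nat) (par : List Nat) : Prop :=
  par.length = N ∧ ∀ x, x < N → par.getD x x ≤ x

theorem getD_set_nat (par : List Nat) (i a x : Nat) :
    (par.set i a).getD x x = if x = i ∧ i < par.length then a else par.getD x x := by
  split_ifs with h
  · obtain ⟨rfl, hi⟩ := h
    simp [List.getD, hi]
  · by_cases hxi : x = i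
    · subst hxi
      rw [List.set_eq_of_length_le (by omega)]
    · simp [List.getD, Ne.symm hxi]

theorem pvFind_succ (par : List Nat) (f x : Nat) :
    pvFind par (f + 1) x = if par.getD x x = x then x else pvFind par f (par.getD x x) := rfl

theorem find_fuel (N : Nat) (par : List Nat) (hwf : Wf N par) :
    ∀ x, x < N → ∀ f, x < f → pvFind par f x = pvRoot par x := by
  intro x
  induction x using Nat.strong_induction_on with
  | _ x ih =>
      intro hx f hf
      obtain ⟨f', rfl⟩ : ∃ f', f = f' + 1 := ⟨f - 1, by omega⟩
      rw [pvFind_succ]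
      by_cases hp : par.getD x x = x
      · rw [if_pos hp]
        unfold pvRoot
        rw [pvFind_succ, if_pos hp]
      · rw [if_neg hp]
        have hplt : par.getD x x < x := lt_of_le_of_ne (hwf.2 x hx) hp
        rw [ih _ hplt (by omega) f' (by omega)]
        conv_rhs => rw [show pvRoot par x = pvFind par (x + 1) x from rfl, pvFind_succ, if_neg hp]
        rw [ih _ hplt (by omega) x (by omega)]

theorem root_fixed {par : List Nat} {r : Nat} (hp : par.getD r r = r) : pvRoot par r = r := by
  unfold pvRoot
  rw [pvFind_succ, if_pos hp]

theorem root_step (N : Nat) (par : List Nat) (hwf : Wf N par) {x : Nat} (hx : x < N)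
    (hp : par.getD x x ≠ x) : pvRoot par x = pvRoot par (par.getD x x) := by
  have hplt : par.getD x x < x := lt_of_le_of_ne (hwf.2 x hx) hp
  conv_lhs => rw [show pvRoot par x = pvFind par (x + 1) x from rfl]
  rw [pvFind_succ, if_neg hp, find_fuel N par hwf _ (by omega) x (by omega)]

theorem root_props (N : Nat) (par : List Nat) (hwf : Wf N par) :
    ∀ x, x < N → pvRoot par x ≤ x ∧ par.getD (pvRoot par x) (pvRoot par x) = pvRoot par x := by
  intro x
  induction x using Nat.strong_induction_on with
  | _ x ih =>
      intro hx
      by_cases hp : par.getD x x = x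
      · rw [root_fixed hp]
        exact ⟨le_refl x, hp⟩
      · have hplt : par.getD x x < x := lt_of_le_of_ne (hwf.2 x hx) hp
        rw [root_step N par hwf hx hp]
        obtain ⟨h1, h2⟩ := ih _ hplt (by omega)
        exact ⟨by omega, h2⟩

theorem root_set (N : Nat) (par : List Nat) (hwf : Wf N par) (r1 r2 : Nat)
    (_h1N : r1 < N) (h2N : r2 < N)
    (hr1 : par.getD r1 r1 = r1) (hr2 : par.getD r2 r2 = r2) (hlt : r1 < r2) :
    Wf N (par.set r2 r1) ∧
    ∀ x, x < N → pvRoot (par.set r2 r1) x = if pvRoot par x = r2 then r1 else pvRoot par x := by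
  have hlen : par.length = N := hwf.1
  have hwf' : Wf N (par.set r2 r1) := by
    refine ⟨by simp [hlen], ?_⟩
    intro x hx
    rw [getD_set_nat]
    split_ifs with h
    · omega
    · exact hwf.2 x hx
  refine ⟨hwf', ?_⟩
  intro x
  induction x using Nat.strong_induction_on with
  | _ x ih =>
      intro hx
      by_cases hx2 : x = r2
      · subst hx2
        have hp' : (par.set x r1).getD x x = r1 := by
          rw [getD_set_nat, if_pos ⟨rfl, by omega⟩]
        have hg1 : (par.set x r1).getD r1 r1 = r1 := by
          rw [getD_set_nat, if_neg (by omega)]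
          exact hr1
        rw [root_step N _ hwf' hx (by rw [hp']; omega), hp', root_fixed hg1,
          root_fixed hr2, if_pos rfl]
      · have hget : (par.set r2 r1).getD x x = par.getD x x := by
          rw [getD_set_nat, if_neg (by tauto)]
        by_cases hp : par.getD x x = x
        · rw [root_fixed (by rw [hget]; exact hp), root_fixed hp, if_neg hx2]
        · have hplt : par.getD x x < x := lt_of_le_of_ne (hwf.2 x hx) hp
          rw [root_step N _ hwf' hx (by rw [hget]; exact hp), hget,
            ih _ hplt (by omega), root_step N par hwf hx hp]

theorem root_range (N x : Nat) (hx : x < N) : pvRoot (List.range N) x = x :=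
  root_fixed (by simp [List.getD, hx])

theorem wf_range (N : Nat) : Wf N (List.range N) := by
  refine ⟨by simp, ?_⟩
  intro x hx
  simp [List.getD, hx]


-- ---------- the equivalence generated by a list of union edges ----------

def erel (E : List (Nat × Nat)) (a b : Nat) : Prop := (a, b) ∈ E ∨ (b, a) ∈ E

def EE (E : List (Nat × Nat)) (x y : Nat) : Prop := Relation.EqvGen (erel E) x y

theorem EE_refl {E : List (Nat × Nat)} (x : Nat) : EE E x x := Relation.EqvGen.refl x

theorem EE_symm {E : List (Nat × Nat)} {x y : Nat} (h : EE E x y) : EE E y x :=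
  Relation.EqvGen.symm x y h

theorem EE_trans {E : List (Nat × Nat)} {x y z : Nat} (h1 : EE E x y) (h2 : EE E y z) : EE E x z :=
  Relation.EqvGen.trans x y z h1 h2

theorem EE_nil {x y : Nat} : EE [] x y ↔ x = y := by
  constructor
  · intro h
    induction h with
    | rel a b hab => rcases hab with h | h <;> cases h
    | refl a => rfl
    | symm a b _ ih => omega
    | trans a b c _ _ ih1 ih2 => omega
  · rintro rfl
    exact EE_refl x

theorem EE_of_sub {E E' : List (Nat × Nat)} (hsub : ∀ e ∈ E, e ∈ E') {x y : Nat}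
    (h : EE E x y) : EE E' x y := by
  refine Relation.EqvGen.mono ?_ h
  intro a b hab
  rcases hab with h | h
  · exact Or.inl (hsub _ h)
  · exact Or.inr (hsub _ h)

theorem EE_snoc {E : List (Nat × Nat)} {a b x y : Nat} :
    EE (E ++ [(a, b)]) x y ↔
      EE E x y ∨ (EE E x a ∧ EE E b y) ∨ (EE E x b ∧ EE E a y) := by
  constructor
  · intro h
    induction h with
    | rel u v huv =>
        rcases huv with h | h
        · rcases List.mem_append.mp h with h | h
          · exact Or.inl (Relation.EqvGen.rel _ _ (Or.inl h))
          · obtain ⟨h1, h2⟩ := Prod.mk.injEq .. ▸ List.mem_singleton.mp h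
            subst h1; subst h2
            exact Or.inr (Or.inl ⟨EE_refl _, EE_refl _⟩)
        · rcases List.mem_append.mp h with h | h
          · exact Or.inl (Relation.EqvGen.rel _ _ (Or.inr h))
          · obtain ⟨h1, h2⟩ := Prod.mk.injEq .. ▸ List.mem_singleton.mp h
            subst h1; subst h2
            exact Or.inr (Or.inr ⟨EE_refl _, EE_refl _⟩)
    | refl u => exact Or.inl (EE_refl u)
    | symm u v _ ih =>
        rcases ih with h | ⟨h1, h2⟩ | ⟨h1, h2⟩
        · exact Or.inl (EE_symm h)
        · exact Or.inr (Or.inr ⟨EE_symm h2, EE_symm h1⟩)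
        · exact Or.inr (Or.inl ⟨EE_symm h2, EE_symm h1⟩)
    | trans u v w _ _ ih1 ih2 =>
        rcases ih1 with h | ⟨h1, h2⟩ | ⟨h1, h2⟩ <;>
          rcases ih2 with h' | ⟨h1', h2'⟩ | ⟨h1', h2'⟩
        · exact Or.inl (EE_trans h h')
        · exact Or.inr (Or.inl ⟨EE_trans h h1', h2'⟩)
        · exact Or.inr (Or.inr ⟨EE_trans h h1', h2'⟩)
        · exact Or.inr (Or.inl ⟨h1, EE_trans h2 h'⟩)
        · exact Or.inr (Or.inl ⟨h1, h2'⟩)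
        · exact Or.inl (EE_trans h1 h2')
        · exact Or.inr (Or.inr ⟨h1, EE_trans h2 h'⟩)
        · exact Or.inl (EE_trans h1 h2')
        · exact Or.inr (Or.inr ⟨h1, h2'⟩)
  · intro h
    have hsub : ∀ e ∈ E, e ∈ E ++ [(a, b)] := fun e he => List.mem_append.mpr (Or.inl he)
    have hab : EE (E ++ [(a, b)]) a b :=
      Relation.EqvGen.rel _ _ (Or.inl (List.mem_append.mpr (Or.inr (List.mem_singleton.mpr rfl))))
    rcases h with h | ⟨h1, h2⟩ | ⟨h1, h2⟩
    · exact EE_of_sub hsub h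
    · exact EE_trans (EE_of_sub hsub h1) (EE_trans hab (EE_of_sub hsub h2))
    · exact EE_trans (EE_of_sub hsub h1) (EE_trans (EE_symm hab) (EE_of_sub hsub h2))


def applyU (par : List Nat) (e : Nat × Nat) : List Nat := pvUnion par e.1 e.2

theorem uf_fold (N : Nat) (E : List (Nat × Nat)) (hE : ∀ e ∈ E, e.1 < N ∧ e.2 < N) :
    Wf N (E.foldl applyU (List.range N)) ∧
    (∀ x y, x < N → y < N →
      (pvRoot (E.foldl applyU (List.range N)) x = pvRoot (E.foldl applyU (List.range N)) y ↔
        EE E x y)) := by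
  induction E using List.reverseRecOn with
  | nil =>
      simp only [List.foldl_nil]
      refine ⟨wf_range N, ?_⟩
      intro x y hx hy
      rw [root_range N x hx, root_range N y hy, EE_nil]
  | append_singleton E e ih =>
      obtain ⟨a, b⟩ := e
      obtain ⟨hwf, hiff⟩ := ih (fun e' he' => hE e' (List.mem_append.mpr (Or.inl he')))
      obtain ⟨ha, hb⟩ := hE (a, b) (List.mem_append.mpr (Or.inr (by simp)))
      have hfold : (E ++ [(a, b)]).foldl applyU (List.range N) =
          pvUnion (E.foldl applyU (List.range N)) a b := by
        rw [List.foldl_append]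
        rfl
      rw [hfold]
      set par := E.foldl applyU (List.range N) with hpar
      have hpa := root_props N par hwf a ha
      have hpb := root_props N par hwf b hb
      have hraN : pvRoot par a < N := by omega
      have hrbN : pvRoot par b < N := by omega
      have hu : pvUnion par a b =
          if pvRoot par a < pvRoot par b then par.set (pvRoot par b) (pvRoot par a)
          else if pvRoot par b < pvRoot par a then par.set (pvRoot par a) (pvRoot par b)
          else par := rfl
      by_cases h1 : pvRoot par a < pvRoot par b
      · rw [hu, if_pos h1]
        obtain ⟨hwf', hroot'⟩ := root_set N par hwf (pvRoot par a) (pvRoot par b)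
          hraN hrbN hpa.2 hpb.2 h1
        refine ⟨hwf', ?_⟩
        intro x y hx hy
        rw [hroot' x hx, hroot' y hy, EE_snoc, ← hiff x y hx hy, ← hiff x a hx ha,
          ← hiff b y hb hy, ← hiff x b hx hb, ← hiff a y ha hy]
        split_ifs <;> omega
      · by_cases h2 : pvRoot par b < pvRoot par a
        · rw [hu, if_neg h1, if_pos h2]
          obtain ⟨hwf', hroot'⟩ := root_set N par hwf (pvRoot par b) (pvRoot par a)
            hrbN hraN hpb.2 hpa.2 h2
          refine ⟨hwf', ?_⟩
          intro x y hx hy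
          rw [hroot' x hx, hroot' y hy, EE_snoc, ← hiff x y hx hy, ← hiff x a hx ha,
            ← hiff b y hb hy, ← hiff x b hx hb, ← hiff a y ha hy]
          split_ifs <;> omega
        · rw [hu, if_neg h1, if_neg h2]
          refine ⟨hwf, ?_⟩
          intro x y hx hy
          rw [EE_snoc, ← hiff x y hx hy, ← hiff x a hx ha,
            ← hiff b y hb hy, ← hiff x b hx hb, ← hiff a y ha hy]
          omega


-- ---------- B's scan as a fold over an explicit edge list ----------

def ufBody (g : List (List Int)) (par : List Nat) (i j : Nat) : List Nat :=
  if 0 < pvGcell g i j then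
    let par' := if i + 1 < g.length ∧ 0 < pvGcell g (i + 1) j then
        pvUnion par (i * pvM g + j) ((i + 1) * pvM g + j) else par
    if j + 1 < pvM g ∧ 0 < pvGcell g i (j + 1) then
      pvUnion par' (i * pvM g + j) (i * pvM g + j + 1) else par'
  else par

def edgesOf (g : List (List Int)) (i j : Nat) : List (Nat × Nat) :=
  if 0 < pvGcell g i j then
    (if i + 1 < g.length ∧ 0 < pvGcell g (i + 1) j then
      [(i * pvM g + j, (i + 1) * pvM g + j)] else []) ++
    (if j + 1 < pvM g ∧ 0 < pvGcell g i (j + 1) then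
      [(i * pvM g + j, i * pvM g + j + 1)] else [])
  else []

def EL (g : List (List Int)) : List (Nat × Nat) :=
  (List.range (g.length * pvM g)).flatMap (fun p => edgesOf g (p / pvM g) (p % pvM g))

theorem ufBody_eq (g : List (List Int)) (par : List Nat) (i j : Nat) :
    ufBody g par i j = (edgesOf g i j).foldl applyU par := by
  unfold ufBody edgesOf
  split_ifs <;> rfl

theorem mem_edgesOf {g : List (List Int)} {i j : Nat} {e : Nat × Nat} (he : e ∈ edgesOf g i j) :
    0 < pvGcell g i j ∧
    ((i + 1 < g.length ∧ 0 < pvGcell g (i + 1) j ∧ e = (i * pvM g + j, (i + 1) * pvM g + j)) ∨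
     (j + 1 < pvM g ∧ 0 < pvGcell g i (j + 1) ∧ e = (i * pvM g + j, i * pvM g + j + 1))) := by
  unfold edgesOf at he
  by_cases h1 : 0 < pvGcell g i j
  · rw [if_pos h1] at he
    refine ⟨h1, ?_⟩
    rcases List.mem_append.mp he with h | h
    · by_cases hA : i + 1 < g.length ∧ 0 < pvGcell g (i + 1) j
      · rw [if_pos hA] at h
        exact Or.inl ⟨hA.1, hA.2, List.mem_singleton.mp h⟩
      · rw [if_neg hA] at h
        cases h
    · by_cases hB : j + 1 < pvM g ∧ 0 < pvGcell g i (j + 1)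
      · rw [if_pos hB] at h
        exact Or.inr ⟨hB.1, hB.2, List.mem_singleton.mp h⟩
      · rw [if_neg hB] at h
        cases h
  · rw [if_neg h1] at he
    cases he

theorem mem_EL {g : List (List Int)} {e : Nat × Nat} (he : e ∈ EL g) :
    ∃ c d : Nat × Nat, AdjP g c d ∧ e = (c.1 * pvM g + c.2, d.1 * pvM g + d.2) := by
  obtain ⟨p, hp, hmem⟩ := List.mem_flatMap.mp he
  have hpN : p < g.length * pvM g := List.mem_range.mp hp
  have hm : 0 < pvM g := by
    by_contra h
    have : pvM g = 0 := by omega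
    rw [this, Nat.mul_zero] at hpN
    omega
  have hij := unflat_lt (n := g.length) hpN
  obtain ⟨hpos, hcase⟩ := mem_edgesOf hmem
  rcases hcase with ⟨hb, hv, rfl⟩ | ⟨hb, hv, rfl⟩
  · refine ⟨(p / pvM g, p % pvM g), (p / pvM g + 1, p % pvM g),
      ⟨⟨hij.1, hij.2, hpos⟩, ⟨hb, hij.2, hv⟩, Or.inr ⟨rfl, Or.inl rfl⟩⟩, rfl⟩
  · refine ⟨(p / pvM g, p % pvM g), (p / pvM g, p % pvM g + 1),
      ⟨⟨hij.1, hij.2, hpos⟩, ⟨hij.1, hb, hv⟩, Or.inl ⟨rfl, Or.inl rfl⟩⟩, ?_⟩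
    have : (p / pvM g) * pvM g + (p % pvM g + 1) = (p / pvM g) * pvM g + (p % pvM g) + 1 := by omega
    rw [this]

theorem EL_bounds (g : List (List Int)) : ∀ e ∈ EL g, e.1 < g.length * pvM g ∧ e.2 < g.length * pvM g := by
  intro e he
  obtain ⟨c, d, hadj, rfl⟩ := mem_EL he
  obtain ⟨⟨hc1, hc2, _⟩, ⟨hd1, hd2, _⟩, _⟩ := hadj
  exact ⟨flat_lt c hc1 hc2, flat_lt d hd1 hd2⟩

theorem adj_to_edge {g : List (List Int)} {c d : Nat × Nat} (h : AdjP g c d) :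
    erel (EL g) (c.1 * pvM g + c.2) (d.1 * pvM g + d.2) := by
  obtain ⟨⟨hc1, hc2, hcv⟩, ⟨hd1, hd2, hdv⟩, hgeo⟩ := h
  have hm : 0 < pvM g := by omega
  have humc := unflat_flat c hc2
  have humd := unflat_flat d hd2
  have hc1' : (c.1 * pvM g + c.2) / pvM g = c.1 := congrArg Prod.fst humc
  have hc2' : (c.1 * pvM g + c.2) % pvM g = c.2 := congrArg Prod.snd humc
  have hd1' : (d.1 * pvM g + d.2) / pvM g = d.1 := congrArg Prod.fst humd
  have hd2' : (d.1 * pvM g + d.2) % pvM g = d.2 := congrArg Prod.snd humd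
  rcases hgeo with ⟨hh, hv | hv⟩ | ⟨hh, hv | hv⟩
  · -- d is right of c
    left
    refine List.mem_flatMap.mpr ⟨c.1 * pvM g + c.2, List.mem_range.mpr (flat_lt c hc1 hc2), ?_⟩
    rw [hc1', hc2']
    unfold edgesOf
    rw [if_pos hcv]
    refine List.mem_append.mpr (Or.inr ?_)
    rw [if_pos ⟨by omega, by rw [show c.2 + 1 = d.2 from hv, show c.1 = d.1 from hh]; exact hdv⟩]
    refine List.mem_singleton.mpr ?_
    rw [← hh, ← hv]
    exact Prod.ext rfl (by dsimp only; omega)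
  · -- d is left of c
    right
    refine List.mem_flatMap.mpr ⟨d.1 * pvM g + d.2, List.mem_range.mpr (flat_lt d hd1 hd2), ?_⟩
    rw [hd1', hd2']
    unfold edgesOf
    rw [if_pos hdv]
    refine List.mem_append.mpr (Or.inr ?_)
    rw [if_pos ⟨by omega, by rw [show d.2 + 1 = c.2 from hv, show d.1 = c.1 from hh.symm]; exact hcv⟩]
    refine List.mem_singleton.mpr ?_
    rw [← hh, ← hv]
    exact Prod.ext rfl (by dsimp only; omega)
  · -- d is below c
    left
    refine List.mem_flatMap.mpr ⟨c.1 * pvM g + c.2, List.mem_range.mpr (flat_lt c hc1 hc2), ?_⟩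
    rw [hc1', hc2']
    unfold edgesOf
    rw [if_pos hcv]
    refine List.mem_append.mpr (Or.inl ?_)
    rw [if_pos ⟨by omega, by rw [show c.1 + 1 = d.1 from hv, show c.2 = d.2 from hh]; exact hdv⟩]
    refine List.mem_singleton.mpr ?_
    rw [← hh, ← hv]
  · -- d is above c
    right
    refine List.mem_flatMap.mpr ⟨d.1 * pvM g + d.2, List.mem_range.mpr (flat_lt d hd1 hd2), ?_⟩
    rw [hd1', hd2']
    unfold edgesOf
    rw [if_pos hdv]
    refine List.mem_append.mpr (Or.inl ?_)
    rw [if_pos ⟨by omega, by rw [show d.1 + 1 = c.1 from hv, show d.2 = c.2 from hh.symm]; exact hcv⟩]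
    refine List.mem_singleton.mpr ?_
    rw [← hh, ← hv]

theorem conn_to_EE {g : List (List Int)} {c d : Nat × Nat} (h : ConnP g c d) :
    EE (EL g) (c.1 * pvM g + c.2) (d.1 * pvM g + d.2) := by
  induction h with
  | refl => exact EE_refl _
  | tail _ hadj ih => exact EE_trans ih (Relation.EqvGen.rel _ _ (adj_to_edge hadj))

theorem flat_inj {g : List (List Int)} {c d : Nat × Nat} (hc : c.2 < pvM g) (hd : d.2 < pvM g)
    (h : c.1 * pvM g + c.2 = d.1 * pvM g + d.2) : c = d := by
  have h1 := unflat_flat c hc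
  have h2 := unflat_flat d hd
  rw [h] at h1
  exact h1.symm.trans h2

theorem EE_to_conn {g : List (List Int)} {x y : Nat} (h : EE (EL g) x y) :
    x = y ∨ ∃ c d : Nat × Nat, PosP g c ∧ PosP g d ∧
      x = c.1 * pvM g + c.2 ∧ y = d.1 * pvM g + d.2 ∧ ConnP g c d := by
  induction h with
  | rel u v huv =>
      rcases huv with h | h
      · obtain ⟨c, d, hadj, he⟩ := mem_EL h
        injection he with he1 he2
        exact Or.inr ⟨c, d, hadj.1, hadj.2.1, he1, he2, Relation.ReflTransGen.single hadj⟩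
      · obtain ⟨c, d, hadj, he⟩ := mem_EL h
        injection he with he1 he2
        exact Or.inr ⟨d, c, hadj.2.1, hadj.1, he2, he1,
          Relation.ReflTransGen.single (adjP_symm hadj)⟩
  | refl u => exact Or.inl rfl
  | symm u v _ ih =>
      rcases ih with h | ⟨c, d, hc, hd, h1, h2, hcn⟩
      · exact Or.inl h.symm
      · exact Or.inr ⟨d, c, hd, hc, h2, h1, connP_symm hcn⟩
  | trans u v w _ _ ih1 ih2 =>
      rcases ih1 with h | ⟨c, d, hc, hd, h1, h2, hcn⟩
      · rcases ih2 with h' | ⟨c', d', hc', hd', h1', h2', hcn'⟩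
        · exact Or.inl (h.trans h')
        · exact Or.inr ⟨c', d', hc', hd', h ▸ h1', h2', hcn'⟩
      · rcases ih2 with h' | ⟨c', d', hc', hd', h1', h2', hcn'⟩
        · exact Or.inr ⟨c, d, hc, hd, h1, h' ▸ h2, hcn⟩
        · have hdc' : d = c' := flat_inj hd.2.1 hc'.2.1 (by omega)
          subst hdc'
          exact Or.inr ⟨c, d', hc, hd', h1, h2', hcn.trans hcn'⟩

-- ---------- B's count equals the representative count ----------

theorem countB_spec (g : List (List Int)) : pvCountB g = (repCount g : Int) := by
  have h0 : pvCountB g =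
      (List.range g.length).foldl (fun c i =>
        (List.range (pvM g)).foldl (fun (c : Int) j =>
          if 0 < pvGcell g i j ∧
              pvRoot ((List.range g.length).foldl (fun par i =>
                (List.range (pvM g)).foldl (fun par j => ufBody g par i j) par)
                (List.range (g.length * pvM g))) (i * pvM g + j) = i * pvM g + j
          then c + 1 else c) c) 0 := rfl
  rw [h0, foldl_range_mul g.length (pvM g)
    (fun par i j => ufBody g par i j) (List.range (g.length * pvM g))]
  have hpar : (List.range (g.length * pvM g)).foldl
      (fun par p => ufBody g par (p / pvM g) (p % pvM g)) (List.range (g.length * pvM g)) =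
      (EL g).foldl applyU (List.range (g.length * pvM g)) := by
    unfold EL
    rw [List.foldl_flatMap]
    refine PySem.List.foldl_congr_mem _ _ _ _ ?_
    intro acc p _
    exact ufBody_eq g acc (p / pvM g) (p % pvM g)
  rw [hpar]
  set par := (EL g).foldl applyU (List.range (g.length * pvM g)) with hpardef
  obtain ⟨hwf, hiff⟩ := uf_fold (g.length * pvM g) (EL g) (EL_bounds g)
  rw [← hpardef] at hwf hiff
  rw [foldl_range_mul g.length (pvM g)
    (fun (c : Int) i j => if 0 < pvGcell g i j ∧
      pvRoot par (i * pvM g + j) = i * pvM g + j then c + 1 else c) 0]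
  rw [PySem.List.foldl_ite_add_one]
  have hcongr : (List.range (g.length * pvM g)).countP
      (fun p => decide (0 < pvGcell g (p / pvM g) (p % pvM g) ∧
        pvRoot par ((p / pvM g) * pvM g + (p % pvM g)) = (p / pvM g) * pvM g + (p % pvM g)))
      = (List.range (g.length * pvM g)).countP (repB g) := by
    refine List.countP_congr ?_
    intro p hp
    have hpN : p < g.length * pvM g := List.mem_range.mp hp
    have hm : 0 < pvM g := by
      by_contra h
      have : pvM g = 0 := by omega
      rw [this, Nat.mul_zero] at hpN
      omega
    have hflat : (p / pvM g) * pvM g + (p % pvM g) = p := flat_unflat p hm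
    have hij := unflat_lt (n := g.length) hpN
    rw [decide_eq_true_eq]
    unfold repB
    rw [@decide_eq_true_eq (repAt g p) (Classical.propDecidable _)]
    rw [hflat]
    constructor
    · rintro ⟨hval, hroot⟩
      refine ⟨⟨hij.1, hij.2, hval⟩, ?_⟩
      intro q' hq' hq'pos hq'conn
      have hEE : EE (EL g) q' p := by
        have := conn_to_EE hq'conn
        rwa [flat_unflat q' hm, flat_unflat p hm] at this
      have hq'N : q' < g.length * pvM g := by omega
      have hrr := (hiff q' p hq'N hpN).mpr hEE
      have hle := (root_props _ par hwf q' hq'N).1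
      rw [hroot] at hrr
      omega
    · rintro ⟨hpos, hmin⟩
      refine ⟨hpos.2.2, ?_⟩
      have hprops := root_props _ par hwf p hpN
      have hrN : pvRoot par p < g.length * pvM g := by omega
      have hEEpr : EE (EL g) p (pvRoot par p) := by
        refine (hiff p (pvRoot par p) hpN hrN).mp ?_
        rw [root_fixed hprops.2]
      rcases EE_to_conn hEEpr with h | ⟨c, d, hc, hd, h1, h2, hcn⟩
      · omega
      · by_cases hrp : pvRoot par p = p
        · exact hrp
        · exfalso
          have hrlt : pvRoot par p < p := by omega
          have hcu : unflat (pvM g) p = c := by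
            rw [h1]
            exact unflat_flat c hc.2.1
          have hdu : unflat (pvM g) (pvRoot par p) = d := by
            rw [h2]
            exact unflat_flat d hd.2.1
          refine hmin (pvRoot par p) hrlt ?_ ?_
          · rw [hdu]
            exact hd
          · rw [hdu, hcu]
            exact connP_symm hcn
  rw [hcongr]
  unfold repCount
  omega

theorem countA_eq_countB (g : List (List Int)) : pvCountA g = pvCountB g := by
  rw [countA_spec, countB_spec]

theorem simLoop_eq (f : Nat) (y : Int) (g : List (List Int)) :
    pvSimLoopA f y g = pvSimLoopB f y g := by
  induction f generalizing y g with
  | zero => rfl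
  | succ f ih =>
      simp only [pvSimLoopA, pvSimLoopB, countA_eq_countB]
      split_ifs <;> simp [ih]

-- ===== VERDICT (by name: the statement is the Claim_ definition above) =====
theorem simulate_iceberg_spec : Claim_equal_simulate_iceberg := by
  intro g _ _
  unfold Spec_simulate_iceberg simulate_iceberg simulate_iceberg_alt
  exact simLoop_eq _ _ _
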